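-- pv_equiv track=rewrite | github.com/yuliaset/DeepRiichi | main.py | is_pinfu
-- ===== SOURCE A (Python) =====
-- def is_pinfu(hand):
--     if any(x == 3 for x in hand):
--         return False
--     if any(hand[i] >= 2 for i in range(27,34)):
--         return False
--     terminals = [0,8,9,17,18,26]
--     for i in terminals:
--         if hand[i] == 2:
--             return False
--     return True
-- ===== SOURCE B (Python) =====
-- def is_pinfu(hand):
--     # Table-driven recursive acceptance: each of the 34 slots has a kind
--     # (Terminal / Simple / Honor) and a per-kind allowed-count predicate.
--     KIND = "TSSSSSSSTTSSSSSSSTTSSSSSSSTHHHHHHH"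
--
--     def go(i):
--         if i == 34:
--             return True
--         c = hand[i]
--         k = KIND[i]
--         if k == 'H':
--             ok = c < 2
--         else:
--             ok = c != 3 and (k == 'S' or c != 2)
--         return ok and go(i + 1)
--
--     return go(0)
-- ===== Notes on version B (the rewrite author's own statement) =====
-- stated objective: alternative
-- what changed: Replaces A's three staged rejection scans (whole-list triplet scan, honor-range scan, terminal-index-list scan) by a recursive descent over the 34 slots driven by a per-slot kind table (Terminal/Simple/Honor) with a per-kind allowed-count predicate.
import Mathlib
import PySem

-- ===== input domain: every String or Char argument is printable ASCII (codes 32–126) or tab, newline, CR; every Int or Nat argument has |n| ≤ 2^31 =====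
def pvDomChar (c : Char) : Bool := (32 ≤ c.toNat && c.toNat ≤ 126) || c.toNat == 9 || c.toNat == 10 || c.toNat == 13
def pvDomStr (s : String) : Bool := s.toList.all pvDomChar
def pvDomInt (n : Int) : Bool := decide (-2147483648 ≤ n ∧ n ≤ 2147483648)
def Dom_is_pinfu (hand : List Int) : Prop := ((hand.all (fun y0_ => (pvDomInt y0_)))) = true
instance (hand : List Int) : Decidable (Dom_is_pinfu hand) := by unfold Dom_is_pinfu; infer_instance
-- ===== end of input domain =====

-- B replaces A's three staged rejection scans by a recursive descent over the 34 slots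
-- driven by a per-slot kind table (Terminal/Simple/Honor) with a per-kind allowed-count
-- predicate; objective: alternative decomposition, same cost.


-- ===== PORT A =====
def is_pinfu (hand : List Int) : Bool :=
  if hand.any (fun x => x == 3) then false
  else if (PySem.List.pyRange 27 34 1).any
      (fun i => decide (2 ≤ (PySem.List.pyGet? hand i).getD 0)) then false
  else
    let terminals : List Int := [0, 8, 9, 17, 18, 26]
    if terminals.any (fun i => (PySem.List.pyGet? hand i).getD 0 == 2) then false
    else true

-- ===== PORT B =====
-- the KIND string of Source B, as its character list
def pinfuKind : List Char :=
  ['T','S','S','S','S','S','S','S','T','T','S','S','S','S','S','S','S','T',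
   'T','S','S','S','S','S','S','S','T','H','H','H','H','H','H','H']

-- Source B's go tests 'i == 34'; go is only ever called with i ≤ 34, so the '34 ≤ i'
-- guard is the same test made total for the termination checker
def pinfuGo (hand : List Int) (i : Nat) : Bool :=
  if 34 ≤ i then true
  else
    let c := (PySem.List.pyGet? hand (i : Int)).getD 0
    let k := (PySem.List.pyGet? pinfuKind (i : Int)).getD ' '
    let ok := if k = 'H' then decide (c < 2)
              else (c != 3 && (k == 'S' || c != 2))
    ok && pinfuGo hand (i + 1)
termination_by 34 - i
decreasing_by omega

def is_pinfu_alt (hand : List Int) : Bool := pinfuGo hand 0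

-- ===== PRECONDITION & SPEC =====
-- Pre_ excludes (a) the hands on which A raises IndexError (shorter than 34 entries with no
-- count 3 anywhere and no count ≥ 2 in a present honor slot ≥ 27, where A's scans run off the
-- end), and (b) hands longer than the 34 tile kinds, a malformed input on which A scans the
-- trailing garbage for triplets while B reads exactly the 34 tile-count slots — both defensible.
def Pre_is_pinfu (hand : List Int) : Prop :=
  hand.length ≤ 34 ∧
    ((3 : Int) ∈ hand ∨ hand.length = 34 ∨
      ((hand.drop 27).any (fun x => decide (2 ≤ x))) = true)
instance (hand : List Int) : Decidable (Pre_is_pinfu hand) := by unfold Pre_is_pinfu; infer_instance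

def pvWitness_is_pinfu : List Int :=
  [1,1,1,0,0,0,0,0,0, 0,0,0,0,0,0,0,0,0, 0,0,0,0,0,0,0,0,0, 1,0,0,0,0,0,0]

def Spec_is_pinfu (hand : List Int) (out : Bool) : Prop := out = is_pinfu_alt hand
instance (hand : List Int) (out : Bool) : Decidable (Spec_is_pinfu hand out) := by unfold Spec_is_pinfu; infer_instance

-- ===== CLAIM (what is proved, stated in full; the proofs are below) =====
def Claim_equal_is_pinfu : Prop := ∀ (hand : List Int), Dom_is_pinfu hand → Pre_is_pinfu hand → Spec_is_pinfu hand (is_pinfu hand)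

-- ===== LEMMAS AND PROOFS =====

-- the per-slot test of B, matched against A's three rejection conditions
lemma pinfu_slot_iff (hand : List Int) (j : Nat) (hj : j < 34) :
    ((if (PySem.List.pyGet? pinfuKind (j : Int)).getD ' ' = 'H'
        then decide ((PySem.List.pyGet? hand (j : Int)).getD 0 < 2)
        else ((PySem.List.pyGet? hand (j : Int)).getD 0 != 3 &&
              ((PySem.List.pyGet? pinfuKind (j : Int)).getD ' ' == 'S' ||
               (PySem.List.pyGet? hand (j : Int)).getD 0 != 2))) = true) ↔
      ((PySem.List.pyGet? hand (j : Int)).getD 0 ≠ 3 ∧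
        ¬(27 ≤ (j : Int) ∧ 2 ≤ (PySem.List.pyGet? hand (j : Int)).getD 0) ∧
        ¬((PySem.List.pyGet? hand (j : Int)).getD 0 = 2 ∧
          (j : Int) ∈ ([0, 8, 9, 17, 18, 26] : List Int))) := by
  set c := (PySem.List.pyGet? hand (j : Int)).getD 0 with hc
  clear_value c
  interval_cases j <;>
    simp [pinfuKind, PySem.List.pyGet?, PySem.List.pyIdx?] <;> omega

lemma pinfuGo_eq_true_iff (hand : List Int) (i : Nat) :
    pinfuGo hand i = true ↔
      ∀ j : Nat, i ≤ j → j < 34 →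
        ((PySem.List.pyGet? hand (j : Int)).getD 0 ≠ 3 ∧
          ¬(27 ≤ (j : Int) ∧ 2 ≤ (PySem.List.pyGet? hand (j : Int)).getD 0) ∧
          ¬((PySem.List.pyGet? hand (j : Int)).getD 0 = 2 ∧
            (j : Int) ∈ ([0, 8, 9, 17, 18, 26] : List Int))) := by
  induction h : 34 - i generalizing i with
  | zero =>
    have h34 : 34 ≤ i := by omega
    unfold pinfuGo
    rw [if_pos h34]
    constructor
    · intro _ j hij hj34; omega
    · intro _; rfl
  | succ n ih =>
    have hlt : i < 34 := by omega
    unfold pinfuGo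
    rw [if_neg (by omega)]
    simp only [Bool.and_eq_true]
    constructor
    · rintro ⟨hok, hrest⟩ j hij hj34
      rcases Nat.eq_or_lt_of_le hij with rfl | hlt2
      · exact (pinfu_slot_iff hand i hj34).mp hok
      · exact (ih (i + 1) (by omega)).mp hrest j hlt2 hj34
    · intro H
      exact ⟨(pinfu_slot_iff hand i hlt).mpr (H i le_rfl hlt),
        (ih (i + 1) (by omega)).mpr (fun j hj hj' => H j (by omega) hj')⟩

theorem is_pinfu_spec : Claim_equal_is_pinfu := by
  intro hand _ hpre
  obtain ⟨hlen, -⟩ := hpre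
  unfold Spec_is_pinfu
  have hlen' : (hand.length : Int) ≤ 34 := by exact_mod_cast hlen
  have hgetlt : ∀ (i : Int) (h0 : 0 ≤ i) (hlt : i < hand.length),
      (PySem.List.pyGet? hand i).getD 0 = hand[i.toNat]'(by omega) := by
    intro i h0 hlt
    rw [PySem.List.pyGet?_eq_some_getElem hand h0 (by exact_mod_cast hlt)]
    rfl
  have hgetge : ∀ (i : Int), (hand.length : Int) ≤ i →
      (PySem.List.pyGet? hand i).getD 0 = 0 := by
    intro i hge
    have : PySem.List.pyGet? hand i = none := by
      rw [PySem.List.pyGet?_eq_none_iff]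
      intro hin
      rcases hin with ⟨-, hlt⟩
      omega
    rw [this]; rfl
  have hA_iff : is_pinfu hand = true ↔
      (hand.any (fun x => x == 3)) = false ∧
      ((PySem.List.pyRange 27 34 1).any
        (fun i => decide (2 ≤ (PySem.List.pyGet? hand i).getD 0))) = false ∧
      (([0, 8, 9, 17, 18, 26] : List Int).any
        (fun i => (PySem.List.pyGet? hand i).getD 0 == 2)) = false := by
    unfold is_pinfu
    dsimp only
    split_ifs with a b c
    · exact iff_of_false (by simp) (fun h => by rw [h.1] at a; cases a)
    · exact iff_of_false (by simp) (fun h => by rw [h.2.1] at b; cases b)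
    · exact iff_of_false (by simp) (fun h => by rw [h.2.2] at c; cases c)
    · exact iff_of_true rfl ⟨by rwa [Bool.not_eq_true] at a, by rwa [Bool.not_eq_true] at b, by rwa [Bool.not_eq_true] at c⟩
  rw [show (is_pinfu hand = is_pinfu_alt hand) ↔
      (is_pinfu hand = true ↔ is_pinfu_alt hand = true) from
    ⟨fun e => by rw [e], fun e => by
      cases hA : is_pinfu hand <;> cases hB : is_pinfu_alt hand <;> simp_all⟩]
  rw [hA_iff]
  unfold is_pinfu_alt
  rw [pinfuGo_eq_true_iff]
  constructor
  · rintro ⟨h3, hHon, hTerm⟩ j _ hj34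
    rw [List.any_eq_false] at h3 hHon hTerm
    refine ⟨?_, ?_, ?_⟩
    · by_cases hlt : (j : Int) < (hand.length : Int)
      · rw [hgetlt (j : Int) (by omega) hlt]
        have hm := h3 (hand[((j : Int)).toNat]'(by omega)) (List.getElem_mem (by omega))
        simpa using hm
      · rw [hgetge (j : Int) (by omega)]; decide
    · rintro ⟨h27, h2⟩
      have := hHon (j : Int) (by rw [PySem.List.mem_pyRange_one]; omega)
      simp only [decide_eq_true_eq] at this
      exact this h2
    · rintro ⟨hv2, hmem⟩
      have := hTerm (j : Int) hmem
      simp only [beq_iff_eq] at this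
      exact this hv2
  · intro H
    refine ⟨?_, ?_, ?_⟩
    · rw [List.any_eq_false]
      intro x hx
      rcases List.mem_iff_getElem.mp hx with ⟨k, hk, rfl⟩
      have h1 := (H k (Nat.zero_le _) (by omega)).1
      rw [hgetlt (k : Int) (by omega) (by exact_mod_cast hk)] at h1
      simpa using h1
    · rw [List.any_eq_false]
      intro i hi
      rw [PySem.List.mem_pyRange_one] at hi
      have hj : i = ((i.toNat : Nat) : Int) := by omega
      have h2 := (H i.toNat (Nat.zero_le _) (by omega)).2.1
      rw [← hj] at h2
      simp only [decide_eq_true_eq]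
      intro hge
      exact h2 ⟨by omega, hge⟩
    · rw [List.any_eq_false]
      intro i hi
      have hvals : i = 0 ∨ i = 8 ∨ i = 9 ∨ i = 17 ∨ i = 18 ∨ i = 26 := by simpa using hi
      have hj : i = ((i.toNat : Nat) : Int) := by
        rcases hvals with rfl | rfl | rfl | rfl | rfl | rfl <;> rfl
      have h2 := (H i.toNat (Nat.zero_le _) (by rcases hvals with rfl | rfl | rfl | rfl | rfl | rfl <;> decide)).2.2
      rw [← hj] at h2
      simp only [beq_iff_eq]
      intro hv2
      exact h2 ⟨hv2, hi⟩
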